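-- pv_equiv track=rewrite | github.com/leandrofroes/bn_ifl | utils.py | is_hex_str
-- ===== SOURCE A (Python) =====
-- def is_hex_str(s):
--     if s[:2] == "0x":
--         s = s[2:]
--
--     hex_digits = set("0123456789abcdefABCDEF")
--
--     for val in s:
--         if not (val in hex_digits):
--             return False
--
--     return True
-- ===== SOURCE B (Python) =====
-- import re
--
-- def is_hex_str(s):
--     if s[:2] == "0x":
--         s = s[2:]
--     return bool(re.fullmatch(r"[0-9a-fA-F]*", s))
-- ===== Notes on version B (the rewrite author's own statement) =====
-- stated objective: idiomatic
-- what changed: Replaces the explicit early-exit character loop over a hand-built digit set with a single regex fullmatch against the hex-digit character class (the * quantifier keeps the empty string accepted).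
import Mathlib
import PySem

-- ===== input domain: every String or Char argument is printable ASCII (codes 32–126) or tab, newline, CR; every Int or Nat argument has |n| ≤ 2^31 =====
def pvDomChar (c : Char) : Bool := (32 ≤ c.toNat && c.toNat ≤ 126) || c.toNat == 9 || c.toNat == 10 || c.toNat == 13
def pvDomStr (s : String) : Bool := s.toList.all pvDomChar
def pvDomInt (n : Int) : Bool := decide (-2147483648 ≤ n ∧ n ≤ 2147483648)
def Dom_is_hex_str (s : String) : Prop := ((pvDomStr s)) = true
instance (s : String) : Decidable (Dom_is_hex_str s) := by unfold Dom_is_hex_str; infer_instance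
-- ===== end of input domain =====

-- B replaces A's explicit early-exit loop over a hand-built digit set with a single
-- regex fullmatch against the hex character class (objective: idiomatic).

-- ===== PORT A =====
-- the 'for val in s: if not (val in hex_digits): return False / return True' loop
def isHexLoopA (hex_digits : PySem.Set Char) : List Char → Bool
  | [] => true
  | c :: rest => if !(PySem.Set.contains hex_digits c) then false else isHexLoopA hex_digits rest

def is_hex_str (s : String) : Bool :=
  let l := s.toList
  let l := if PySem.List.slice l none (some 2) = "0x".toList then PySem.List.slice l (some 2) none else l
  let hex_digits := PySem.Set.ofList "0123456789abcdefABCDEF".toList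
  isHexLoopA hex_digits l

-- ===== PORT B =====
-- re.fullmatch(r"[0-9a-fA-F]*", s): every character of s matches the class [0-9a-fA-F]
def hexClassB (c : Char) : Bool :=
  ('0' ≤ c && c ≤ '9') || ('a' ≤ c && c ≤ 'f') || ('A' ≤ c && c ≤ 'F')

def is_hex_str_alt (s : String) : Bool :=
  let l := s.toList
  let l := if PySem.List.slice l none (some 2) = "0x".toList then PySem.List.slice l (some 2) none else l
  l.all hexClassB

-- ===== PRECONDITION & SPEC =====
def Spec_is_hex_str (s : String) (out : Bool) : Prop := out = is_hex_str_alt s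
instance (s : String) (out : Bool) : Decidable (Spec_is_hex_str s out) := by unfold Spec_is_hex_str; infer_instance

-- ===== CLAIM (what is proved, stated in full; the proofs are below) =====
def Claim_equal_is_hex_str : Prop := ∀ (s : String), Dom_is_hex_str s → Spec_is_hex_str s (is_hex_str s)

-- ===== LEMMAS AND PROOFS =====
lemma char_eq_iff (c d : Char) : c = d ↔ c.toNat = d.toNat := by
  constructor
  · rintro rfl; rfl
  · intro h; apply Char.ext; exact UInt32.toNat_inj.mp h

lemma char_le_iff (c d : Char) : (c ≤ d) ↔ c.toNat ≤ d.toNat := by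
  rw [Char.le_def, UInt32.le_iff_toNat_le]; exact Iff.rfl

lemma hex_contains_eq_class (c : Char) :
    PySem.Set.contains (PySem.Set.ofList "0123456789abcdefABCDEF".toList) c = hexClassB c := by
  rw [Bool.eq_iff_iff, PySem.Set.contains_iff]
  have hl : "0123456789abcdefABCDEF".toList
      = ['0','1','2','3','4','5','6','7','8','9','a','b','c','d','e','f','A','B','C','D','E','F'] := rfl
  rw [show (c ∈ PySem.Set.ofList "0123456789abcdefABCDEF".toList) ↔ c ∈ "0123456789abcdefABCDEF".toList
      from PySem.Set.mem_ofList _ _, hl]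
  simp only [List.mem_cons, List.not_mem_nil, or_false, char_eq_iff,
    hexClassB, Bool.or_eq_true, Bool.and_eq_true, decide_eq_true_eq, char_le_iff]
  simp only [show ('0':Char).toNat = 48 from rfl,
    show ('1':Char).toNat = 49 from rfl,
    show ('2':Char).toNat = 50 from rfl,
    show ('3':Char).toNat = 51 from rfl,
    show ('4':Char).toNat = 52 from rfl,
    show ('5':Char).toNat = 53 from rfl,
    show ('6':Char).toNat = 54 from rfl,
    show ('7':Char).toNat = 55 from rfl,
    show ('8':Char).toNat = 56 from rfl,
    show ('9':Char).toNat = 57 from rfl,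
    show ('a':Char).toNat = 97 from rfl,
    show ('b':Char).toNat = 98 from rfl,
    show ('c':Char).toNat = 99 from rfl,
    show ('d':Char).toNat = 100 from rfl,
    show ('e':Char).toNat = 101 from rfl,
    show ('f':Char).toNat = 102 from rfl,
    show ('A':Char).toNat = 65 from rfl,
    show ('B':Char).toNat = 66 from rfl,
    show ('C':Char).toNat = 67 from rfl,
    show ('D':Char).toNat = 68 from rfl,
    show ('E':Char).toNat = 69 from rfl,
    show ('F':Char).toNat = 70 from rfl]
  omega

lemma loopA_eq_all (hd : PySem.Set Char) (l : List Char) :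
    isHexLoopA hd l = l.all (fun c => PySem.Set.contains hd c) := by
  induction l with
  | nil => rfl
  | cons c rest ih =>
    simp only [isHexLoopA, List.all_cons, ih]
    cases PySem.Set.contains hd c <;> simp

-- ===== VERDICT (by name: the statement is the Claim_ definition above) =====
theorem is_hex_str_spec : Claim_equal_is_hex_str := by
  intro s _
  unfold Spec_is_hex_str is_hex_str is_hex_str_alt
  simp only [loopA_eq_all]
  congr 1
  funext c
  exact hex_contains_eq_class c
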